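-- pv_equiv track=rewrite | github.com/DTOcean/dtocean | packages/mdo-engine/src/mdo_engine/utilities/misc.py | safe_update
-- ===== SOURCE A (Python) =====
-- from copy import deepcopy
--
-- def safe_update(dst_dict, src_dict, allow_none=False):
--     """Update the dst_dict using the src_dict, but only the keys contained
--     in dst_dict, and where values in the src_dict are not None, assuming
--     allow_none is False"""
--
--     dst_copy = deepcopy(dst_dict)
--
--     if allow_none:
--         src_copy = deepcopy(src_dict)
--
--     else:
--         src_copy = {k: v for k, v in src_dict.items() if v is not None}
--
--     dst_copy.update((k, src_copy[k]) for k in dst_copy.keys() & src_copy.keys())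
--
--     return dst_copy
-- ===== SOURCE B (Python) =====
-- from copy import deepcopy
--
-- def safe_update(dst_dict, src_dict, allow_none=False):
--     """Update a deep copy of dst_dict with values from src_dict for keys
--     already present in dst_dict; None values in src_dict are skipped
--     unless allow_none is True (values then come from a deep copy of
--     src_dict)."""
--     src = deepcopy(src_dict) if allow_none else src_dict
--     return {k: src[k] if k in src and (allow_none or src[k] is not None)
--                else deepcopy(v)
--             for k, v in dst_dict.items()}
-- ===== Notes on version B (the rewrite author's own statement) =====
-- stated objective: simpler
-- what changed: Replaces A's filtered-dict construction plus explicit key-set intersection and dict.update with a single dst-driven dict comprehension that decides per key whether to take the source value.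
import Mathlib
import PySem

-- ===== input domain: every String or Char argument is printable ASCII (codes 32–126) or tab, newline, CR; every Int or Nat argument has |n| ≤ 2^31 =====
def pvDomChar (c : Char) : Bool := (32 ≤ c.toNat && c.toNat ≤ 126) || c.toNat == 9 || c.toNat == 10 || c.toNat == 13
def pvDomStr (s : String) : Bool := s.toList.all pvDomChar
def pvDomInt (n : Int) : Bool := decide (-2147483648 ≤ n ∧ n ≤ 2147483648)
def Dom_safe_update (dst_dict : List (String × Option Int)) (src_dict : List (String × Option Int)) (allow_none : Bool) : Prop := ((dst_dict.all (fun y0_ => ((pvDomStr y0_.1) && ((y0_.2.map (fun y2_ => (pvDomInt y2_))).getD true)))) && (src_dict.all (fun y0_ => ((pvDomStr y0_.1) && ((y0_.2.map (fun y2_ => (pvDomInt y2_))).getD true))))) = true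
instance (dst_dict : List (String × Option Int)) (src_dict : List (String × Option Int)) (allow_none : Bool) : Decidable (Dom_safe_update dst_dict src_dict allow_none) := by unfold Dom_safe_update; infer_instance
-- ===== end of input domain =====

-- B replaces A's filtered-dict construction and explicit key-set intersection with a
-- single dst-driven dict comprehension (objective: simpler). A/B mutate nothing observable;
-- equivalence is about the returned dict.


-- ===== PORT A =====
-- deepcopy only duplicates the dicts; the returned value is the same, so it is the identity here.
-- The Python iterates the key-set intersection in an unspecified set order; since update only
-- overwrites keys already present, the result is order-independent, and we transcribe the
-- intersection in dst-key order.
def safe_update (dst_dict : List (String × Option Int)) (src_dict : List (String × Option Int)) (allow_none : Bool) : List (String × Option Int) :=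
  let dst_copy := PySem.Dict.ofList dst_dict
  let src_copy : PySem.Dict String (Option Int) :=
    if allow_none then PySem.Dict.ofList src_dict
    else PySem.Dict.mk (((PySem.Dict.ofList src_dict).items).filter (fun p => p.2.isSome))
  let inter := dst_copy.keys.filter (fun k => src_copy.contains k)
  (inter.foldl (fun d k => d.insert k (src_copy.getD k none)) dst_copy).items

-- ===== PORT B =====
def safe_update_alt (dst_dict : List (String × Option Int)) (src_dict : List (String × Option Int)) (allow_none : Bool) : List (String × Option Int) :=
  let src := PySem.Dict.ofList src_dict
  ((PySem.Dict.ofList dst_dict).items).map (fun p =>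
    if src.contains p.1 && (allow_none || (src.getD p.1 none).isSome)
    then (p.1, src.getD p.1 none) else p)

-- ===== PRECONDITION & SPEC =====
def Spec_safe_update (dst_dict : List (String × Option Int)) (src_dict : List (String × Option Int)) (allow_none : Bool) (out : List (String × Option Int)) : Prop := out = safe_update_alt dst_dict src_dict allow_none
instance (dst_dict : List (String × Option Int)) (src_dict : List (String × Option Int)) (allow_none : Bool) (out : List (String × Option Int)) : Decidable (Spec_safe_update dst_dict src_dict allow_none out) := by unfold Spec_safe_update; infer_instance

-- ===== CLAIM (what is proved, stated in full; the proofs are below) =====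
def Claim_equal_safe_update : Prop := ∀ (dst_dict : List (String × Option Int)) (src_dict : List (String × Option Int)) (allow_none : Bool), Dom_safe_update dst_dict src_dict allow_none → Spec_safe_update dst_dict src_dict allow_none (safe_update dst_dict src_dict allow_none)

-- ===== LEMMAS AND PROOFS =====

-- Lookup into the None-filtered dict, in terms of lookup into the original (nodup keys).
theorem get?_mk_filter_isSome (l : List (String × Option Int)) (k : String)
    (h : (l.map Prod.fst).Nodup) :
    (PySem.Dict.mk (l.filter (fun p => p.2.isSome))).get? k =
      ((PySem.Dict.mk l).get? k).bind (fun v => if v.isSome then some v else none) := by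
  induction l with
  | nil => simp [PySem.Dict.get?]
  | cons hd t ih =>
    obtain ⟨k', v'⟩ := hd
    simp only [List.map_cons, List.nodup_cons] at h
    obtain ⟨hk, ht⟩ := h
    by_cases he : k' = k
    · subst he
      cases v' with
      | none =>
        have hnone : (PySem.Dict.mk (t.filter (fun p => p.2.isSome))).get? k' = none := by
          rw [PySem.Dict.get?_eq_none_iff_not_mem_keys]
          intro hmem
          apply hk
          simp only [PySem.Dict.keys, List.mem_map] at hmem
          rcases hmem with ⟨q, hq, hq1⟩
          exact List.mem_map.mpr ⟨q, (List.mem_filter.mp hq).1, hq1⟩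
        simp [PySem.Dict.get?_mk_cons, hnone]
      | some w => simp [PySem.Dict.get?_mk_cons]
    · cases v' <;> simp [PySem.Dict.get?_mk_cons, he, ih ht]

-- Folding inserts of distinct keys that are all already present rewrites the items in place.
theorem foldl_insert_items (ks : List String) (f : String → Option Int)
    (d : PySem.Dict String (Option Int)) (hn : ks.Nodup)
    (hc : ∀ k ∈ ks, d.contains k = true) :
    (ks.foldl (fun d k => d.insert k (f k)) d).items
      = d.items.map (fun p => if p.1 ∈ ks then (p.1, f p.1) else p) := by
  induction ks generalizing d with
  | nil => simp
  | cons k t ih =>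
    simp only [List.nodup_cons] at hn
    obtain ⟨hkt, hnt⟩ := hn
    have hck : d.contains k = true := hc k (List.mem_cons_self ..)
    have hct : ∀ k' ∈ t, (d.insert k (f k)).contains k' = true := by
      intro k' hk'
      rw [PySem.Dict.contains_insert]
      simp [hc k' (List.mem_cons_of_mem _ hk')]
    rw [List.foldl_cons, ih (d.insert k (f k)) hnt hct, PySem.Dict.items_insert, if_pos hck,
        List.map_map]
    apply List.map_congr_left
    intro p _
    by_cases hpk : p.1 = k
    · simp [Function.comp, hpk, hkt]
    · simp [Function.comp, hpk, List.mem_cons]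

-- A's update loop over the key intersection, as a map over dst's items.
theorem update_loop_items (dst_dict : List (String × Option Int))
    (sc : PySem.Dict String (Option Int)) :
    (((PySem.Dict.ofList dst_dict).keys.filter (fun k => sc.contains k)).foldl
        (fun d k => d.insert k (sc.getD k none)) (PySem.Dict.ofList dst_dict)).items
      = (PySem.Dict.ofList dst_dict).items.map
          (fun p => if sc.contains p.1 then (p.1, sc.getD p.1 none) else p) := by
  have hdn : (PySem.Dict.ofList dst_dict).keys.Nodup := PySem.Dict.nodup_keys_ofList dst_dict
  have hcc : ∀ k ∈ (PySem.Dict.ofList dst_dict).keys.filter (fun k => sc.contains k),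
      (PySem.Dict.ofList dst_dict).contains k = true := by
    intro k hk
    exact (PySem.Dict.contains_iff_mem_keys _ k).mpr (List.mem_filter.mp hk).1
  rw [foldl_insert_items _ _ _ (hdn.filter _) hcc]
  apply List.map_congr_left
  intro p hp
  have hpk : p.1 ∈ (PySem.Dict.ofList dst_dict).keys := List.mem_map.mpr ⟨p, hp, rfl⟩
  by_cases h : sc.contains p.1 = true
  · simp [List.mem_filter, hpk, h]
  · simp [List.mem_filter, h]

theorem safe_update_eq_alt (dst_dict src_dict : List (String × Option Int))
    (allow_none : Bool) :
    safe_update dst_dict src_dict allow_none = safe_update_alt dst_dict src_dict allow_none := by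
  unfold safe_update safe_update_alt
  cases allow_none with
  | true =>
    simp only [if_pos, Bool.true_or, Bool.and_true]
    rw [update_loop_items]
  | false =>
    simp only [Bool.false_or, Bool.false_eq_true, reduceIte]
    rw [update_loop_items]
    apply List.map_congr_left
    intro p _
    have hsn : ((PySem.Dict.ofList src_dict).items.map Prod.fst).Nodup :=
      PySem.Dict.nodup_keys_ofList src_dict
    have hgf := get?_mk_filter_isSome (PySem.Dict.ofList src_dict).items p.1 hsn
    cases hq : (PySem.Dict.ofList src_dict).get? p.1 with
    | none =>
      have hc1 : (PySem.Dict.ofList src_dict).contains p.1 = false := by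
        rw [PySem.Dict.contains_eq_isSome_get?, hq]; rfl
      have hc2 : (PySem.Dict.mk ((PySem.Dict.ofList src_dict).items.filter
          (fun p => p.2.isSome))).contains p.1 = false := by
        rw [PySem.Dict.contains_eq_isSome_get?, hgf, hq]; rfl
      simp [hc1, hc2]
    | some v =>
      have hc1 : (PySem.Dict.ofList src_dict).contains p.1 = true := by
        rw [PySem.Dict.contains_eq_isSome_get?, hq]; rfl
      have hg1 : (PySem.Dict.ofList src_dict).getD p.1 none = v := by
        rw [PySem.Dict.getD_eq_get?_getD, hq]; rfl
      cases v with
      | none =>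
        have hc2 : (PySem.Dict.mk ((PySem.Dict.ofList src_dict).items.filter
            (fun p => p.2.isSome))).contains p.1 = false := by
          rw [PySem.Dict.contains_eq_isSome_get?, hgf, hq]; rfl
        simp [hc1, hc2, hg1]
      | some w =>
        have hc2 : (PySem.Dict.mk ((PySem.Dict.ofList src_dict).items.filter
            (fun p => p.2.isSome))).contains p.1 = true := by
          rw [PySem.Dict.contains_eq_isSome_get?, hgf, hq]; rfl
        have hg2 : (PySem.Dict.mk ((PySem.Dict.ofList src_dict).items.filter
            (fun p => p.2.isSome))).getD p.1 none = some w := by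
          rw [PySem.Dict.getD_eq_get?_getD, hgf, hq]; rfl
        simp [hc1, hc2, hg1, hg2]

-- ===== VERDICT (by name: the statement is the Claim_ definition above) =====
theorem safe_update_spec : Claim_equal_safe_update := by
  intro dst_dict src_dict allow_none _
  unfold Spec_safe_update
  exact safe_update_eq_alt dst_dict src_dict allow_none
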